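-- pv_equiv track=rewrite | github.com/samlyme/Assignments-F2025 | MAT3100W/HW08/code/num_antitransitive.py | all_digraphs
-- ===== SOURCE A (Python) =====
-- import itertools
--
-- def all_digraphs(n: int):
--     if n <= 0:
--         return []
--
--     # Edge positions to toggle (ordered pairs)
--     positions = []
--     for i in range(n):
--         for j in range(n):
--             positions.append((i, j))
--
--     num_edges = len(positions)  # n*(n-1) if no self-loops; n*n if with self-loops
--
--     for bits in itertools.product([0, 1], repeat=num_edges):
--         # start with all zeros
--         adj = [[0]*n for _ in range(n)]
--         for (k, (i, j)) in enumerate(positions):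
--             adj[i][j] = bits[k]
--         # if self_loops is False, diagonal is already zero by construction
--         yield adj
-- ===== SOURCE B (Python) =====
-- import itertools
--
-- def all_digraphs(n: int):
--     if n <= 0:
--         return
--     rows = list(itertools.product([0, 1], repeat=n))
--     for combo in itertools.product(rows, repeat=n):
--         yield [list(r) for r in combo]
-- ===== Notes on version B (the rewrite author's own statement) =====
-- stated objective: simpler
-- what changed: B precomputes the list of all possible rows once and takes the n-fold Cartesian product over whole rows, instead of enumerating flat bit-tuples and filling a zero matrix through a position-index table.
import Mathlib
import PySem

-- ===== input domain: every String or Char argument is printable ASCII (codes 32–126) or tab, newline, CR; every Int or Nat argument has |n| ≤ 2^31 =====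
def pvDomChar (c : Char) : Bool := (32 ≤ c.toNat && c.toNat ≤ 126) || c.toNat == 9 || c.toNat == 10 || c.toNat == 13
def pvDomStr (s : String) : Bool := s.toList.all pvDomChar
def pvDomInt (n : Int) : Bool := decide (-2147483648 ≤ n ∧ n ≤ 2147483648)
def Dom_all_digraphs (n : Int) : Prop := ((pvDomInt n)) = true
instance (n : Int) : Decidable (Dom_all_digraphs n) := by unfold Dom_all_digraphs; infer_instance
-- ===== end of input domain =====

-- B replaces A's flat bit-product plus position-index matrix fill by a nested Cartesian
-- product over a precomputed row table (same output order); objective: simpler.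


-- ===== PORT A =====
-- itertools.product(xs, repeat=m) in Python's lexicographic order (shared by both ports)
def pvProd {α : Type} (xs : List α) : Nat → List (List α)
  | 0 => [[]]
  | m + 1 => xs.flatMap (fun x => (pvProd xs m).map (fun t => x :: t))

-- Python's enumerate(l, start=k)
def pvEnum {α : Type} (k : Nat) : List α → List (Nat × α)
  | [] => []
  | x :: l => (k, x) :: pvEnum (k + 1) l

-- adj[i][j] = v; exact for in-range i and j, which always holds in all_digraphs
def pvSetAt (adj : List (List Int)) (i j : Nat) (v : Int) : List (List Int) :=
  adj.modify i (fun row => row.set j v)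

def all_digraphs (n : Int) : List (List (List Int)) :=
  if n ≤ 0 then []
  else
    let nn := n.toNat
    let positions := (List.range nn).flatMap (fun i => (List.range nn).map (fun j => (i, j)))
    let num_edges := positions.length
    (pvProd ([0, 1] : List Int) num_edges).map (fun bits =>
      let adj := List.replicate nn (List.replicate nn (0 : Int))
      -- bits[k] is always in range (bits has length num_edges), so getD is exact here
      (pvEnum 0 positions).foldl
        (fun a p => pvSetAt a p.2.1 p.2.2 (bits.getD p.1 0)) adj)

-- ===== PORT B =====
def all_digraphs_alt (n : Int) : List (List (List Int)) :=
  if n ≤ 0 then []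
  else
    let rows := pvProd ([0, 1] : List Int) n.toNat
    (pvProd rows n.toNat).map (fun combo => combo.map (fun r => r))

-- ===== PRECONDITION & SPEC =====
def Spec_all_digraphs (n : Int) (out : List (List (List Int))) : Prop := out = all_digraphs_alt n
instance (n : Int) (out : List (List (List Int))) : Decidable (Spec_all_digraphs n out) := by unfold Spec_all_digraphs; infer_instance

-- ===== CLAIM (what is proved, stated in full; the proofs are below) =====
def Claim_equal_all_digraphs : Prop := ∀ (n : Int), Dom_all_digraphs n → Spec_all_digraphs n (all_digraphs n)

-- ===== LEMMAS AND PROOFS =====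

-- the i-th row of A's matrix for a given bit vector
def pvChunk (nn m : Nat) (bits : List Int) : List (List Int) :=
  (List.range m).map (fun i => (List.range nn).map (fun j => bits.getD (i * nn + j) 0))

lemma pvEnum_append {α : Type} (k : Nat) (xs ys : List α) :
    pvEnum k (xs ++ ys) = pvEnum k xs ++ pvEnum (k + xs.length) ys := by
  induction xs generalizing k with
  | nil => simp [pvEnum]
  | cons a l ih => simp [pvEnum, ih (k+1)]; ring_nf
  
lemma pvEnum_map {α β : Type} (k : Nat) (f : α → β) (xs : List α) :
    pvEnum k (xs.map f) = (pvEnum k xs).map (fun p => (p.1, f p.2)) := by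
  induction xs generalizing k with
  | nil => simp [pvEnum]
  | cons a l ih => simp [pvEnum, ih (k+1)]

lemma modify_nil {α : Type} (i : Nat) (f : α → α) : ([] : List α).modify i f = [] := by
  cases i <;> simp [List.modify]

lemma modify_zero_cons {α : Type} (a : α) (l : List α) (f : α → α) :
    (a :: l).modify 0 f = f a :: l := by
  simp [List.modify]

lemma modify_succ_cons {α : Type} (a : α) (l : List α) (i : Nat) (f : α → α) :
    (a :: l).modify (i + 1) f = a :: l.modify i f := by
  simp [List.modify]

lemma modify_id' {α : Type} (l : List α) (i : Nat) : l.modify i (fun x => x) = l := by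
  induction l generalizing i with
  | nil => exact modify_nil i _
  | cons a l ih => cases i with
      | zero => rw [modify_zero_cons]
      | succ i => rw [modify_succ_cons, ih]

lemma modify_modify_same {α : Type} (i : Nat) (f g : α → α) (l : List α) :
    (l.modify i f).modify i g = l.modify i (fun x => g (f x)) := by
  induction l generalizing i with
  | nil => simp [modify_nil]
  | cons a l ih => cases i with
      | zero => simp [modify_zero_cons]
      | succ i => simp [modify_succ_cons, ih]

lemma modify_congr_elem {α : Type} (l : List α) (i : Nat) (f g : α → α)
    (h : i < l.length) (hfg : f l[i] = g l[i]) : l.modify i f = l.modify i g := by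
  induction l generalizing i with
  | nil => simp at h
  | cons a l ih =>
      cases i with
      | zero => simp [modify_zero_cons]; simpa using hfg
      | succ i =>
          rw [modify_succ_cons, modify_succ_cons,
              ih i (by simpa using h) (by simpa using hfg)]

lemma modify_out {α : Type} (l : List α) (i : Nat) (f : α → α) (h : l.length ≤ i) :
    l.modify i f = l := by
  induction l generalizing i with
  | nil => simp [modify_nil]
  | cons a l ih =>
      cases i with
      | zero => simp at h
      | succ i => rw [modify_succ_cons, ih i (by simpa using h)]

lemma mem_modify {α : Type} {l : List α} {i : Nat} {f : α → α} {x : α}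
    (hx : x ∈ l.modify i f) : x ∈ l ∨ ∃ a ∈ l, x = f a := by
  induction l generalizing i with
  | nil => simp [modify_nil] at hx
  | cons a l ih =>
      cases i with
      | zero =>
          rw [modify_zero_cons] at hx
          rcases List.mem_cons.mp hx with h | h
          · exact Or.inr ⟨a, by simp, h⟩
          · exact Or.inl (by simp [h])
      | succ i =>
          rw [modify_succ_cons] at hx
          rcases List.mem_cons.mp hx with h | h
          · exact Or.inl (by simp [h])
          · rcases ih h with h | ⟨b, hb, rfl⟩
            · exact Or.inl (by simp [h])
            · exact Or.inr ⟨b, by simp [hb], rfl⟩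

lemma modify_append_boundary {α : Type} (pre : List α) (x : α) (xs : List α) (f : α → α) :
    (pre ++ x :: xs).modify pre.length f = pre ++ f x :: xs := by
  induction pre with
  | nil => simp [modify_zero_cons]
  | cons a l ih => simp only [List.cons_append, List.length_cons, modify_succ_cons, ih]

lemma foldl_modify_same {β : Type} (g : List Int → β → List Int) (i : Nat) :
    ∀ (l : List β) (adj : List (List Int)),
      l.foldl (fun a x => a.modify i (fun r => g r x)) adj
        = adj.modify i (fun r => l.foldl g r) := by
  intro l
  induction l with
  | nil => intro adj; simp [modify_id']
  | cons x l ih =>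
      intro adj
      simp only [List.foldl_cons, ih, modify_modify_same]

lemma foldl_set_shift (v : Nat × Nat → Int) :
    ∀ (l : List (Nat × Nat)) (c : Int) (r : List Int),
      l.foldl (fun r p => r.set (p.2 + 1) (v p)) (c :: r)
        = c :: l.foldl (fun r p => r.set p.2 (v p)) r := by
  intro l
  induction l with
  | nil => intro c r; rfl
  | cons p l ih => intro c r; simp [ih]

lemma rowEnumFold (bits : List Int) :
    ∀ (m k : Nat) (row : List Int), row.length = m →
      (pvEnum k (List.range m)).foldl (fun r p => r.set p.2 (bits.getD p.1 0)) row
        = (List.range m).map (fun j => bits.getD (k + j) 0) := by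
  intro m
  induction m with
  | zero => intro k row h; simp [List.length_eq_zero_iff.mp h, pvEnum]
  | succ m ih =>
      intro k row h
      rcases row with _ | ⟨a, rest⟩
      · simp at h
      · rw [List.range_succ_eq_map, pvEnum]
        simp only [List.foldl_cons, pvEnum_map, List.foldl_map]
        have hset : (a :: rest).set 0 (bits.getD k 0) = bits.getD k 0 :: rest := rfl
        rw [hset]
        rw [show (fun (r : List Int) (p : Nat × Nat) => r.set p.2.succ (bits.getD p.1 0))
              = (fun r p => r.set (p.2 + 1) (bits.getD p.1 0)) from rfl]
        rw [foldl_set_shift (fun p => bits.getD p.1 0)]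
        rw [ih (k+1) rest (by simpa using h)]
        rw [List.map_cons, List.map_map]
        refine congrArg₂ (· :: ·) (by simp) (List.map_congr_left (fun j _ => ?_))
        simp only [Function.comp_apply, Nat.succ_eq_add_one]
        congr 1
        omega

lemma blockFold (bits : List Int) (nn k i : Nat) (adj : List (List Int))
    (H : ∀ row ∈ adj, row.length = nn) :
    (pvEnum k ((List.range nn).map (fun j => (i, j)))).foldl
        (fun a p => pvSetAt a p.2.1 p.2.2 (bits.getD p.1 0)) adj
      = adj.modify i (fun _ => (List.range nn).map (fun j => bits.getD (k + j) 0)) := by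
  rw [pvEnum_map, List.foldl_map]
  simp only [pvSetAt]
  rw [foldl_modify_same (fun r p => r.set p.2 (bits.getD p.1 0)) i (pvEnum k (List.range nn)) adj]
  by_cases h : i < adj.length
  · exact modify_congr_elem _ _ _ _ h
      (rowEnumFold bits nn k adj[i] (H _ (List.getElem_mem h)))
  · rw [modify_out _ _ _ (by omega), modify_out _ _ _ (by omega)]

lemma foldRows (bits : List Int) (nn : Nat) :
    ∀ (m s : Nat) (adj : List (List Int)), (∀ row ∈ adj, row.length = nn) →
      (pvEnum (s * nn) ((List.range' s m).flatMap
          (fun i => (List.range nn).map (fun j => (i, j))))).foldl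
          (fun a p => pvSetAt a p.2.1 p.2.2 (bits.getD p.1 0)) adj
        = (List.range' s m).foldl
            (fun a i => a.modify i (fun _ => (List.range nn).map (fun j => bits.getD (i * nn + j) 0)))
            adj := by
  intro m
  induction m with
  | zero => intro s adj _; simp [pvEnum]
  | succ m ih =>
      intro s adj H
      rw [List.range'_succ, List.flatMap_cons, pvEnum_append, List.foldl_append]
      rw [blockFold bits nn (s * nn) s adj H]
      have hlen : ((List.range nn).map (fun j => (s, j))).length = nn := by simp
      rw [hlen, show s * nn + nn = (s + 1) * nn by ring]
      rw [ih (s + 1) _ ?_]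
      · simp [List.foldl_cons]
      · intro row hr
        rcases mem_modify hr with h | ⟨a, _, rfl⟩
        · exact H _ h
        · simp

lemma finalFold (g : Nat → List Int) :
    ∀ (m s : Nat) (pre cur : List (List Int)), pre.length = s → cur.length = m →
      (List.range' s m).foldl (fun a i => a.modify i (fun _ => g i)) (pre ++ cur)
        = pre ++ (List.range' s m).map g := by
  intro m
  induction m with
  | zero =>
      intro s pre cur _ hc
      simp [List.length_eq_zero_iff.mp hc]
  | succ m ih =>
      intro s pre cur hp hc
      rcases cur with _ | ⟨c, cur'⟩
      · simp at hc
      · rw [List.range'_succ, List.foldl_cons]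
        rw [show s = pre.length from hp.symm, modify_append_boundary]
        have : pre ++ g pre.length :: cur' = (pre ++ [g pre.length]) ++ cur' := by simp
        rw [this, ih (pre.length + 1) (pre ++ [g pre.length]) cur' (by simp) (by simpa using hc)]
        simp

lemma foldA (bits : List Int) (nn : Nat) :
    (pvEnum 0 ((List.range nn).flatMap (fun i => (List.range nn).map (fun j => (i, j))))).foldl
        (fun a p => pvSetAt a p.2.1 p.2.2 (bits.getD p.1 0))
        (List.replicate nn (List.replicate nn (0 : Int)))
      = pvChunk nn nn bits := by
  have H : ∀ row ∈ List.replicate nn (List.replicate nn (0 : Int)), row.length = nn := by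
    intro row hr; rw [List.eq_of_mem_replicate hr]; simp
  have h1 := foldRows bits nn nn 0 _ H
  rw [Nat.zero_mul, ← List.range_eq_range'] at h1
  rw [h1]
  have f2 := finalFold (fun i => (List.range nn).map (fun j => bits.getD (i * nn + j) 0))
      nn 0 [] _ rfl (show (List.replicate nn (List.replicate nn (0 : Int))).length = nn by simp)
  simp only [List.nil_append] at f2
  rw [← List.range_eq_range'] at f2
  rw [f2]
  simp [pvChunk]

lemma prodLen {α : Type} (xs : List α) : ∀ (k : Nat) (u : List α), u ∈ pvProd xs k → u.length = k := by
  intro k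
  induction k with
  | zero => intro u hu; simp [pvProd] at hu; simp [hu]
  | succ k ih =>
      intro u hu
      simp [pvProd] at hu
      rcases hu with ⟨x, _, t, ht, rfl⟩
      simp [ih t ht]

lemma prodAdd {α : Type} (xs : List α) : ∀ (a b : Nat),
    pvProd xs (a + b) = (pvProd xs a).flatMap (fun u => (pvProd xs b).map (fun v => u ++ v)) := by
  intro a
  induction a with
  | zero => intro b; simp [pvProd]
  | succ a ih =>
      intro b
      rw [show a + 1 + b = (a + b) + 1 by ring]
      simp only [pvProd, ih b, List.flatMap_map, List.map_flatMap, List.map_map]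
      simp [List.flatMap_assoc, List.flatMap_map, List.cons_append, Function.comp_def]

lemma flatMap_congr_mem {α β : Type} {l : List α} {f g : α → List β}
    (h : ∀ a ∈ l, f a = g a) : l.flatMap f = l.flatMap g := by
  induction l with
  | nil => rfl
  | cons a l ih =>
      simp only [List.flatMap_cons, h a (by simp), ih (fun b hb => h b (by simp [hb]))]

lemma selfGetD : ∀ (u : List Int), (List.range u.length).map (fun j => u.getD j 0) = u := by
  intro u
  induction u with
  | nil => simp
  | cons a l ih =>
      rw [List.length_cons, List.range_succ_eq_map, List.map_cons, List.map_map]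
      refine congrArg₂ (· :: ·) (by simp) ?_
      calc ((List.range l.length).map ((fun j => (a :: l).getD j 0) ∘ Nat.succ))
          = (List.range l.length).map (fun j => l.getD j 0) :=
            List.map_congr_left (fun j _ => by simp)
        _ = l := ih

lemma getD_append_left (u v : List Int) (j : Nat) (h : j < u.length) :
    (u ++ v).getD j 0 = u.getD j 0 := by
  simp [List.getD_eq_getElem?_getD, List.getElem?_append_left h]

lemma getD_append_right (u v : List Int) (t : Nat) :
    (u ++ v).getD (u.length + t) 0 = v.getD t 0 := by
  simp [List.getD_eq_getElem?_getD, List.getElem?_append_right (Nat.le_add_right u.length t)]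

lemma chunk_cons (nn m : Nat) (u v : List Int) (hu : u.length = nn) :
    pvChunk nn (m + 1) (u ++ v) = u :: pvChunk nn m v := by
  unfold pvChunk
  rw [List.range_succ_eq_map, List.map_cons, List.map_map]
  congr 1
  · have : ∀ j ∈ List.range nn, (u ++ v).getD (0 * nn + j) 0 = u.getD j 0 := by
      intro j hj
      rw [show 0 * nn + j = j by ring]
      exact getD_append_left u v j (by rw [hu]; simpa using hj)
    rw [List.map_congr_left this, ← hu, selfGetD]
  · refine List.map_congr_left (fun i _ => ?_)
    simp only [Function.comp_apply, Nat.succ_eq_add_one]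
    refine List.map_congr_left (fun j _ => ?_)
    rw [show (i + 1) * nn + j = u.length + (i * nn + j) by rw [hu]; ring]
    exact getD_append_right u v _

lemma chunkProd (nn : Nat) : ∀ (m : Nat),
    (pvProd ([0, 1] : List Int) (m * nn)).map (pvChunk nn m)
      = pvProd (pvProd ([0, 1] : List Int) nn) m := by
  intro m
  induction m with
  | zero => simp [pvProd, pvChunk]
  | succ m ih =>
      rw [show (m + 1) * nn = nn + m * nn by ring, prodAdd]
      simp only [List.map_flatMap, List.map_map]
      rw [pvProd]
      apply flatMap_congr_mem
      intro u hu
      have hu' : u.length = nn := prodLen _ nn u hu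
      calc (pvProd ([0,1] : List Int) (m * nn)).map ((pvChunk nn (m+1)) ∘ (fun v => u ++ v))
          = (pvProd ([0,1] : List Int) (m * nn)).map (fun v => u :: pvChunk nn m v) := by
            apply List.map_congr_left
            intro v _
            simp [Function.comp_def, chunk_cons nn m u v hu']
        _ = ((pvProd ([0,1] : List Int) (m * nn)).map (pvChunk nn m)).map (fun c => u :: c) := by
            simp [List.map_map, Function.comp_def]
        _ = (pvProd (pvProd ([0,1] : List Int) nn) m).map (fun t => u :: t) := by rw [ih]

lemma positions_len (nn : Nat) :
    ((List.range nn).flatMap (fun i => (List.range nn).map (fun j => (i, j)))).length = nn * nn := by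
  simp [List.length_flatMap, Function.comp_def]

-- ===== VERDICT (by name: the statement is the Claim_ definition above) =====
theorem all_digraphs_spec : Claim_equal_all_digraphs := by
  intro n _
  unfold Spec_all_digraphs all_digraphs all_digraphs_alt
  by_cases h : n ≤ 0
  · simp [h]
  · simp only [h, if_false]
    rw [List.map_congr_left (fun bits _ => foldA bits n.toNat)]
    rw [positions_len, chunkProd]
    simp
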